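-- pv_equiv track=rewrite | github.com/unworthyzeus/TFGAllProgress_Tries_and_Attempts | tmp_review/histograms_try74/validate_histograms_csv.py | validate_contiguity
-- ===== SOURCE A (Python) =====
-- from collections import Counter, defaultdict
--
-- def sample_key(row: dict[str, str]) -> str:
--     return f"{row.get('city', '')}/{row.get('sample', '')}"
--
-- def validate_contiguity(rows: list[dict[str, str]]) -> list[str]:
--     positions: dict[str, list[int]] = defaultdict(list)
--     for idx, row in enumerate(rows):
--         positions[sample_key(row)].append(idx)
--     bad: list[str] = []
--     for key, idxs in positions.items():
--         start = idxs[0]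
--         expected = list(range(start, start + len(idxs)))
--         if idxs != expected:
--             bad.append(key)
--     return bad
-- ===== SOURCE B (Python) =====
-- def sample_key(row: dict[str, str]) -> str:
--     return f"{row.get('city', '')}/{row.get('sample', '')}"
--
-- def validate_contiguity(rows: list[dict[str, str]]) -> list[str]:
--     # single pass: track each key's last-seen row index and flag gaps inline
--     last: dict[str, int] = {}
--     broken: set[str] = set()
--     for idx, row in enumerate(rows):
--         k = sample_key(row)
--         prev = last.get(k)
--         if prev is not None and prev != idx - 1:
--             broken.add(k)
--         last[k] = idx
--     return [k for k in last if k in broken]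
-- ===== Notes on version B (the rewrite author's own statement) =====
-- stated objective: simpler
-- what changed: Replaces 'group all indices per key, then compare each list to a rebuilt contiguous range' with a single pass that keeps only each key's last-seen index and flags a key the moment a non-consecutive repeat appears; output order (first occurrence) comes from the ordered dict of last-seen indices.
import Mathlib
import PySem

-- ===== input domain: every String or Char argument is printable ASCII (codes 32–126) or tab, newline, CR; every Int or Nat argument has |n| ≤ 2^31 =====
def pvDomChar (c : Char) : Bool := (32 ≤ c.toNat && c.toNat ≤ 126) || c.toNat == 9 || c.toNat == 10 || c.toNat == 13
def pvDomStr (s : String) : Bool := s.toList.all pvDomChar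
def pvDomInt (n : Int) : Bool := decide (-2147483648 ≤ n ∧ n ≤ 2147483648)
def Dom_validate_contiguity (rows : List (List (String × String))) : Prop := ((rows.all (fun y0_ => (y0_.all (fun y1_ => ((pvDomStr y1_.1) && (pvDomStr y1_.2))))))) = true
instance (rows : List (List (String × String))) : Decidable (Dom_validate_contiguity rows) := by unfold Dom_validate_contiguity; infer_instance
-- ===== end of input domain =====

-- B is a simpler single-pass check: last-seen index per key + a broken set, instead of
-- grouping all indices per key and comparing each group to a rebuilt contiguous range.

-- shared helper (both Pythons define the identical sample_key)
def sampleKey (row : List (String × String)) : String :=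
  (PySem.Dict.getD (PySem.Dict.mk row) "city" "") ++ "/" ++ (PySem.Dict.getD (PySem.Dict.mk row) "sample" "")

-- ===== PORT A =====
def validate_contiguity (rows : List (List (String × String))) : List String :=
  let positions : PySem.Dict String (List Int) :=
    (PySem.List.enumerate rows 0).foldl
      (fun d p => d.modify (sampleKey p.2) [] (· ++ [p.1])) PySem.Dict.empty
  positions.items.foldl
    (fun bad p =>
      -- idxs[0]: every idxs stored in positions is nonempty, so the default is never used
      let start := PySem.List.pyGetD p.2 0 0
      let expected := PySem.List.pyRange start (start + p.2.length) 1
      if p.2 ≠ expected then bad ++ [p.1] else bad) []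

-- ===== PORT B =====
def validate_contiguity_alt (rows : List (List (String × String))) : List String :=
  let st := (PySem.List.enumerate rows 0).foldl
    (fun (st : PySem.Dict String Int × PySem.Set String) p =>
      let k := sampleKey p.2
      let broken := match st.1.get? k with
        | some prev => if prev ≠ p.1 - 1 then PySem.Set.add st.2 k else st.2
        | none => st.2
      (st.1.insert k p.1, broken))
    (PySem.Dict.empty, PySem.Set.empty)
  st.1.keys.filter (fun k => PySem.Set.contains st.2 k)

-- ===== PRECONDITION & SPEC =====
def Spec_validate_contiguity (rows : List (List (String × String))) (out : List String) : Prop := out = validate_contiguity_alt rows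
instance (rows : List (List (String × String))) (out : List String) : Decidable (Spec_validate_contiguity rows out) := by unfold Spec_validate_contiguity; infer_instance

-- ===== CLAIM (what is proved, stated in full; the proofs are below) =====
def Claim_equal_validate_contiguity : Prop := ∀ (rows : List (List (String × String))), Dom_validate_contiguity rows → Spec_validate_contiguity rows (validate_contiguity rows)

-- ===== LEMMAS AND PROOFS =====

-- occurrence indices of key k in a (key, index) list
def occ (l : List (String × Int)) (k : String) : List Int :=
  (l.filter (·.1 == k)).map (·.2)

-- "the list is a consecutive run a, a+1, a+2, …"
def isRun : List Int → Bool
  | [] => true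
  | [_] => true
  | a :: b :: t => (b == a + 1) && isRun (b :: t)

theorem occ_append (l m : List (String × Int)) (k : String) :
    occ (l ++ m) k = occ l k ++ occ m k := by
  simp [occ]

theorem occ_singleton (k k' : String) (i : Int) :
    occ [(k, i)] k' = if k == k' then [i] else [] := by
  by_cases h : k = k'
  · subst h; simp [occ]
  · simp [occ, h]

theorem isRun_append_singleton (xs : List Int) (i : Int) :
    isRun (xs ++ [i]) =
      (isRun xs && (match xs.getLast? with | none => true | some p => p == i - 1)) := by
  induction xs with
  | nil => simp [isRun]
  | cons a t ih =>
    cases t with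
    | nil => simp [isRun]; omega
    | cons b t' =>
      simp only [List.cons_append, isRun] at ih ⊢
      rw [ih]
      simp [List.getLast?_cons_cons, Bool.and_assoc]

theorem run_iff (t : List Int) (a : Int) :
    (a :: t = PySem.List.pyRange a (a + ((t.length : Int) + 1)) 1) ↔ isRun (a :: t) = true := by
  induction t generalizing a with
  | nil =>
    simp [isRun, PySem.List.pyRange_one_singleton]
  | cons b t' ih =>
    have hcons : PySem.List.pyRange a (a + ((((b :: t').length : Nat) : Int) + 1)) 1
        = a :: PySem.List.pyRange (a + 1) (a + (((b :: t').length : Int) + 1)) 1 :=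
      PySem.List.pyRange_one_cons (by simp; omega)
    rw [hcons]
    constructor
    · intro h
      have hb : b :: t' = PySem.List.pyRange (a + 1) (a + (((b :: t').length : Int) + 1)) 1 :=
        ((List.cons.injEq _ _ _ _).mp h).2
      have hb' : b :: t' = PySem.List.pyRange (a + 1) ((a + 1) + ((t'.length : Int) + 1)) 1 := by
        rw [hb]; congr 1; simp; ring
      have hbhead : b = a + 1 := by
        have h2 := hb'
        rw [PySem.List.pyRange_one_cons (by omega)] at h2
        exact ((List.cons.injEq _ _ _ _).mp h2).1
      subst hbhead
      have hr := (ih (a + 1)).mp hb'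
      simp [isRun, hr]
    · intro h
      simp only [isRun, Bool.and_eq_true, beq_iff_eq] at h
      obtain ⟨hb, hrun⟩ := h
      subst hb
      have hb' := (ih (a + 1)).mpr hrun
      rw [List.cons.injEq]
      refine ⟨rfl, ?_⟩
      rw [hb']; congr 1; simp; ring

-- A's per-key test equals the negation of isRun
theorem cond_eq_isRun (idxs : List Int) :
    (decide ¬(idxs = PySem.List.pyRange (PySem.List.pyGetD idxs 0 0)
        (PySem.List.pyGetD idxs 0 0 + (idxs.length : Int)) 1)) = !isRun idxs := by
  cases idxs with
  | nil => simp [isRun]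
  | cons a t =>
    have h := run_iff t a
    have hd : PySem.List.pyGetD (a :: t) 0 0 = a := by
      simp [PySem.List.pyGetD_zero_cons]
    rw [hd]
    have hlen : ((a :: t).length : Int) = (t.length : Int) + 1 := by simp
    rw [hlen]
    by_cases hc : a :: t = PySem.List.pyRange a (a + ((t.length : Int) + 1)) 1
    · have hr := h.mp hc
      have hdec : (decide ¬(a :: t = PySem.List.pyRange a (a + ((t.length : Int) + 1)) 1)) = false := by
        simp [hc]
      rw [hdec, hr]
      rfl
    · have hr : isRun (a :: t) = false := by
        cases hr : isRun (a :: t)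
        · rfl
        · exact absurd (h.mpr hr) hc
      simp [hc, hr]

-- B's fold step over (key, index) pairs
def stepB (st : PySem.Dict String Int × PySem.Set String) (q : String × Int) :
    PySem.Dict String Int × PySem.Set String :=
  let broken := match st.1.get? q.1 with
    | some prev => if prev ≠ q.2 - 1 then PySem.Set.add st.2 q.1 else st.2
    | none => st.2
  (st.1.insert q.1 q.2, broken)

theorem foldB_inv (l : List (String × Int)) (pre : List (String × Int))
    (last : PySem.Dict String Int) (broken : PySem.Set String)
    (hlast : ∀ k, last.get? k = (occ pre k).getLast?)
    (hbrk : ∀ k, k ∈ broken ↔ isRun (occ pre k) = false) :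
    (∀ k, (l.foldl stepB (last, broken)).1.get? k = (occ (pre ++ l) k).getLast?) ∧
    (∀ k, k ∈ (l.foldl stepB (last, broken)).2 ↔ isRun (occ (pre ++ l) k) = false) := by
  induction l generalizing pre last broken with
  | nil => simpa using ⟨hlast, hbrk⟩
  | cons q l' ih =>
    obtain ⟨k, i⟩ := q
    have hpre : pre ++ (k, i) :: l' = (pre ++ [(k, i)]) ++ l' := by simp
    rw [hpre, List.foldl_cons]
    refine ih (pre ++ [(k, i)]) _ _ ?_ ?_
    · -- last-seen component
      intro k'
      show ((last.insert k i)).get? k' = _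
      rw [occ_append, occ_singleton]
      by_cases hk : k' = k
      · subst hk
        simp [PySem.Dict.get?_insert_self]
      · rw [PySem.Dict.get?_insert_of_ne _ _ hk]
        have hkk : (k == k') = false := by simp [Ne.symm hk]
        simp [hkk, hlast]
    · -- broken component
      intro k'
      rw [occ_append, occ_singleton]
      by_cases hk : k' = k
      · subst hk
        simp only [beq_self_eq_true, if_true]
        cases hg : last.get? k' with
        | none =>
          have hnil : occ pre k' = [] := by
            have h1 := hlast k'
            rw [hg] at h1
            exact List.getLast?_eq_none_iff.mp h1.symm
          simp [hnil, isRun, hbrk k']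
        | some prev =>
          have hgl : (occ pre k').getLast? = some prev := by rw [← hlast k', hg]
          rw [isRun_append_singleton, hgl]
          by_cases hp : prev = i - 1
          · subst hp
            simp [hbrk k']
          · have hpb : (prev == i - 1) = false := by simp [hp]
            simp [hp, hpb, PySem.Set.mem_add, hbrk k']
      · have hkk : (k == k') = false := by simp [Ne.symm hk]
        simp only [hkk, Bool.false_eq_true, if_false, List.append_nil]
        cases hg : last.get? k with
        | none => exact hbrk k'
        | some prev =>
          by_cases hp : prev = i - 1
          · simp [hp, hbrk k']
          · simp [hp, PySem.Set.mem_add, hk, hbrk k']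

theorem keys_foldB (l : List (String × Int)) (last : PySem.Dict String Int)
    (broken : PySem.Set String) :
    (l.foldl stepB (last, broken)).1 = l.foldl (fun d q => d.insert q.1 q.2) last := by
  induction l generalizing last broken with
  | nil => rfl
  | cons q l' ih => exact ih _ _

-- A's output loop, characterised as a filter
theorem foldA_items (items : List (String × List Int)) (acc : List String) :
    items.foldl (fun bad p =>
        if p.2 ≠ PySem.List.pyRange (PySem.List.pyGetD p.2 0 0)
            (PySem.List.pyGetD p.2 0 0 + (p.2.length : Int)) 1
        then bad ++ [p.1] else bad) acc
      = acc ++ (items.filter (fun p => !isRun p.2)).map (·.1) := by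
  induction items generalizing acc with
  | nil => simp
  | cons p t ih =>
    have hc := cond_eq_isRun p.2
    simp only [List.foldl_cons, List.filter_cons]
    by_cases h : p.2 ≠ PySem.List.pyRange (PySem.List.pyGetD p.2 0 0)
        (PySem.List.pyGetD p.2 0 0 + (p.2.length : Int)) 1
    · have hb : (!isRun p.2) = true := by rw [← hc]; simp [h]
      rw [if_pos h, ih, hb]
      simp
    · have hb : (!isRun p.2) = false := by rw [← hc]; simp [h]
      rw [if_neg h, ih, hb]
      simp

-- map-pair-then-filter-on-second = filter-on-the-function
theorem filter_map_fst (K : List String) (g : String → List Int) (p : List Int → Bool) :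
    (((K.map (fun k => (k, g k))).filter (fun q => p q.2)).map (·.1))
      = K.filter (fun k => p (g k)) := by
  induction K with
  | nil => simp
  | cons k t ih =>
    simp only [List.map_cons, List.filter_cons]
    by_cases h : p (g k)
    · simp [h, ih]
    · simp [h, ih]

theorem validate_contiguity_eq (rows : List (List (String × String))) :
    validate_contiguity rows = validate_contiguity_alt rows := by
  -- work over the list of (key, index) pairs
  have hkis : ∃ kis : List (String × Int),
      kis = (PySem.List.enumerate rows 0).map (fun p => (sampleKey p.2, p.1)) := ⟨_, rfl⟩
  obtain ⟨kis, hkis⟩ := hkis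
  -- both folds, rewritten over kis
  have hApos : ((PySem.List.enumerate rows 0).foldl
      (fun d p => d.modify (sampleKey p.2) [] (· ++ [p.1])) PySem.Dict.empty)
      = kis.foldl (fun d q => d.modify q.1 [] (· ++ [q.2])) PySem.Dict.empty := by
    rw [hkis, List.foldl_map]
  have hBfold : ((PySem.List.enumerate rows 0).foldl
      (fun (st : PySem.Dict String Int × PySem.Set String) p =>
        let k := sampleKey p.2
        let broken := match st.1.get? k with
          | some prev => if prev ≠ p.1 - 1 then PySem.Set.add st.2 k else st.2
          | none => st.2
        (st.1.insert k p.1, broken))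
      (PySem.Dict.empty, PySem.Set.empty))
      = kis.foldl stepB (PySem.Dict.empty, PySem.Set.empty) := by
    rw [hkis, List.foldl_map]; rfl
  simp only [validate_contiguity, validate_contiguity_alt]
  rw [hApos, hBfold]
  set positions := kis.foldl (fun d q => d.modify q.1 [] (· ++ [q.2])) PySem.Dict.empty with hpos
  set stB := kis.foldl stepB (PySem.Dict.empty, PySem.Set.empty) with hstB
  -- invariants of the B fold
  have hinv := foldB_inv kis [] PySem.Dict.empty PySem.Set.empty
    (by intro k; simp [occ, PySem.Dict.get?_empty])
    (by intro k; simp [occ, isRun, PySem.Set.empty])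
  rw [← hstB] at hinv
  simp only [List.nil_append] at hinv
  -- keys agree
  have hnodup : positions.keys.Nodup := by
    rw [hpos]
    exact PySem.Dict.nodup_keys_foldl_modify_key kis (·.1) [] (fun d q => (· ++ [q.2])) _
      PySem.Dict.nodup_keys_empty
  have hkeysA : positions.keys = PySem.Set.update [] (kis.map (·.1)) := by
    rw [hpos]
    simpa using PySem.Dict.keys_foldl_modify_key kis (·.1) [] (fun d q => (· ++ [q.2]))
      PySem.Dict.empty
  have hkeysB : stB.1.keys = PySem.Set.update [] (kis.map (·.1)) := by
    rw [hstB, keys_foldB]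
    simpa using PySem.Dict.keys_foldl_insert_key kis (·.1) (fun d q => q.2) PySem.Dict.empty
  -- per-key stored list
  have hgetD : ∀ k, positions.getD k [] = occ kis k := by
    intro k
    rw [hpos, PySem.Dict.getD_foldl_modify_append]
    simp [occ, PySem.Dict.getD_empty]
  -- items as a map over keys
  have hitems : positions.items = positions.keys.map (fun k => (k, positions.getD k [])) :=
    PySem.Dict.items_eq_map_keys positions hnodup []
  rw [foldA_items, List.nil_append, hitems,
    filter_map_fst positions.keys (fun k => positions.getD k []) (fun l => !isRun l),
    hkeysA, hkeysB]
  apply List.filter_congr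
  intro k _
  rw [hgetD k]
  have hm := hinv.2 k
  by_cases hr : isRun (occ kis k) = false
  · have hmem : k ∈ stB.2 := hm.mpr hr
    simp [PySem.Set.contains, hmem, hr]
  · have hne : k ∉ stB.2 := fun h => hr (hm.mp h)
    have hr' : isRun (occ kis k) = true := by
      revert hr; cases isRun (occ kis k) <;> simp
    simp [PySem.Set.contains, hne, hr']

-- ===== VERDICT (by name: the statement is the Claim_ definition above) =====
theorem validate_contiguity_spec : Claim_equal_validate_contiguity := by
  intro rows _
  unfold Spec_validate_contiguity
  exact validate_contiguity_eq rows
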